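-- pv_equiv track=rewrite | github.com/q5438722/intent_formalization | src/utils/pipeline_common.py | strip_spec
-- ===== SOURCE A (Python) =====
-- def strip_spec(source_text: str) -> str:
--     """Strip requires/ensures clause content, replacing with 'true,'.
--
--     Used for tautology detection: if φ still verifies after stripping,
--     it's spec-independent (a tautology).
--     """
--     lines = source_text.split('\n')
--     result = []
--     i = 0
--
--     while i < len(lines):
--         line = lines[i]
--         stripped = line.strip()
--
--         if stripped in ('requires', 'ensures'):
--             result.append(line)  # keep keyword
--             i += 1
--             added_true = False
--             while i < len(lines):
--                 next_stripped = lines[i].strip()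
--                 # Stop at: next keyword, opening brace, empty line, closing brace
--                 if next_stripped in ('requires', 'ensures', 'recommends', 'decreases', '{', '}', ''):
--                     break
--                 if next_stripped.startswith('//'):
--                     result.append(lines[i])  # keep comments
--                     i += 1
--                     continue
--                 if not added_true:
--                     indent = len(lines[i]) - len(lines[i].lstrip())
--                     result.append(' ' * indent + 'true,')
--                     added_true = True
--                 # Skip remaining condition lines
--                 i += 1
--             continue
--
--         result.append(line)
--         i += 1
--
--     return '\n'.join(result)
-- ===== SOURCE B (Python) =====
-- def strip_spec(source_text: str) -> str:
--     """Single flat pass over the lines with state flags instead of the nested while."""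
--     STOP = ('requires', 'ensures', 'recommends', 'decreases', '{', '}', '')
--     out = []
--     in_clause = False
--     added_true = False
--     for line in source_text.split('\n'):
--         s = line.strip()
--         if in_clause:
--             if s in STOP:
--                 in_clause = False  # fall through: this line is handled normally
--             elif s.startswith('//'):
--                 out.append(line)
--                 continue
--             else:
--                 if not added_true:
--                     indent = len(line) - len(line.lstrip())
--                     out.append(' ' * indent + 'true,')
--                     added_true = True
--                 continue
--         out.append(line)
--         if s in ('requires', 'ensures'):
--             in_clause = True
--             added_true = False
--     return '\n'.join(out)
-- ===== Notes on version B (the rewrite author's own statement) =====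
-- stated objective: simpler
-- what changed: Replaced A's nested outer+inner while loops with index management by a single flat loop over the lines carrying two state flags (in_clause, added_true); a stop line clears the flag and is re-dispatched by the same iteration.
import Mathlib
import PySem

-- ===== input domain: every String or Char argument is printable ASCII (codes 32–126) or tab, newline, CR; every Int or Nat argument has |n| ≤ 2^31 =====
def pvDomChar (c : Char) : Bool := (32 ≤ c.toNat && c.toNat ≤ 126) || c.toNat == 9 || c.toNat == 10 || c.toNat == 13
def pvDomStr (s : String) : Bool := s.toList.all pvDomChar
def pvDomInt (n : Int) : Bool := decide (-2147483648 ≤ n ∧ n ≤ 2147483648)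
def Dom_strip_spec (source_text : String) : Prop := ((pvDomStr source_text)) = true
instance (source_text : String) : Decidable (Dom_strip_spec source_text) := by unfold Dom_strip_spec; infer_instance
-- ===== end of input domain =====

-- B replaces A's nested outer+inner while with a single flat pass carrying state flags (objective: simpler).

-- ===== PORT A =====
-- the stop tokens of the inner loop
def pvStopA : List (List Char) :=
  ["requires".toList, "ensures".toList, "recommends".toList, "decreases".toList, "{".toList, "}".toList, []]

-- A's inner while loop: returns (lines appended, remaining lines)
def stripA_inner (added : Bool) : List (List Char) → (List (List Char) × List (List Char))
  | [] => ([], [])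
  | l :: ls =>
    let s := PySem.Chars.strip l
    if s ∈ pvStopA then ([], l :: ls)
    else if PySem.Chars.startswith s "//".toList then
      let p := stripA_inner added ls
      (l :: p.1, p.2)
    else if !added then
      let indent := l.length - (PySem.Chars.lstrip l).length
      let p := stripA_inner true ls
      ((List.replicate indent ' ' ++ "true,".toList) :: p.1, p.2)
    else stripA_inner added ls

theorem stripA_inner_rest_le (added : Bool) (ls : List (List Char)) :
    (stripA_inner added ls).2.length ≤ ls.length := by
  induction ls generalizing added with
  | nil => simp [stripA_inner]
  | cons l ls ih =>
    simp only [stripA_inner]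
    split_ifs <;> simp <;> exact le_trans (ih _) (Nat.le_succ _)

-- A's outer while loop
def stripA_lines : List (List Char) → List (List Char)
  | [] => []
  | l :: ls =>
    if PySem.Chars.strip l ∈ ["requires".toList, "ensures".toList] then
      let p := stripA_inner false ls
      l :: (p.1 ++ stripA_lines p.2)
    else l :: stripA_lines ls
termination_by ls => ls.length
decreasing_by
  · exact Nat.lt_succ_of_le (stripA_inner_rest_le false ls)
  · simp

def strip_spec (source_text : String) : String :=
  String.ofList (PySem.Chars.join "\n".toList
    (stripA_lines (PySem.Chars.splitOn source_text.toList "\n".toList)))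

-- ===== PORT B =====
-- one flat loop with flags in_clause / added_true; a stop line clears in_clause and
-- falls through to the normal handling of that same line
def stripB_go (inClause added : Bool) : List (List Char) → List (List Char)
  | [] => []
  | l :: ls =>
    let s := PySem.Chars.strip l
    if inClause then
      if s ∈ pvStopA then
        -- in_clause := false, fall through to normal handling
        if s ∈ ["requires".toList, "ensures".toList] then l :: stripB_go true false ls
        else l :: stripB_go false added ls
      else if PySem.Chars.startswith s "//".toList then l :: stripB_go true added ls
      else if !added then
        (List.replicate (l.length - (PySem.Chars.lstrip l).length) ' ' ++ "true,".toList)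
          :: stripB_go true true ls
      else stripB_go true added ls
    else
      if s ∈ ["requires".toList, "ensures".toList] then l :: stripB_go true false ls
      else l :: stripB_go false added ls

def strip_spec_alt (source_text : String) : String :=
  String.ofList (PySem.Chars.join "\n".toList
    (stripB_go false false (PySem.Chars.splitOn source_text.toList "\n".toList)))

-- ===== PRECONDITION & SPEC =====
def Spec_strip_spec (source_text : String) (out : String) : Prop := out = strip_spec_alt source_text
instance (source_text : String) (out : String) : Decidable (Spec_strip_spec source_text out) := by unfold Spec_strip_spec; infer_instance

-- ===== CLAIM (what is proved, stated in full; the proofs are below) =====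
def Claim_equal_strip_spec : Prop := ∀ (source_text : String), Dom_strip_spec source_text → Spec_strip_spec source_text (strip_spec source_text)

-- ===== LEMMAS AND PROOFS =====

theorem stripB_eq_stripA (ls : List (List Char)) :
    (∀ a, stripB_go false a ls = stripA_lines ls) ∧
    (∀ a, stripB_go true a ls =
      (stripA_inner a ls).1 ++ stripA_lines (stripA_inner a ls).2) := by
  induction ls with
  | nil => simp [stripB_go, stripA_inner, stripA_lines]
  | cons l ls ih =>
    constructor
    · intro a
      by_cases hk : PySem.Chars.strip l ∈ ["requires".toList, "ensures".toList]
      · simp only [stripB_go, stripA_lines, if_pos hk, Bool.false_eq_true, if_false]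
        rw [ih.2 false]
      · simp only [stripB_go, stripA_lines, if_neg hk, Bool.false_eq_true, if_false]
        rw [ih.1 a]
    · intro a
      by_cases hs : PySem.Chars.strip l ∈ pvStopA
      · by_cases hk : PySem.Chars.strip l ∈ ["requires".toList, "ensures".toList]
        · simp only [stripB_go, stripA_inner, stripA_lines, if_pos hs, if_pos hk, if_true]
          rw [ih.2 false]; simp
        · simp only [stripB_go, stripA_inner, stripA_lines, if_pos hs, if_neg hk, if_true]
          rw [ih.1 a]; simp
      · by_cases hc : PySem.Chars.startswith (PySem.Chars.strip l) "//".toList = true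
        · simp only [stripB_go, stripA_inner, if_neg hs, if_pos hc, if_true]
          rw [ih.2 a]; simp
        · by_cases ha : a = true
          · subst ha
            simp only [stripB_go, stripA_inner, if_neg hs, if_neg hc, if_true,
              Bool.not_true, Bool.false_eq_true, if_false]
            rw [ih.2 true]
          · have ha' : a = false := by cases a <;> simp_all
            subst ha'
            simp only [stripB_go, stripA_inner, if_neg hs, if_neg hc, if_true,
              Bool.not_false, if_true]
            rw [ih.2 true]; simp

-- ===== VERDICT (by name: the statement is the Claim_ definition above) =====
theorem strip_spec_spec : Claim_equal_strip_spec := by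
  intro s _
  unfold Spec_strip_spec strip_spec strip_spec_alt
  rw [(stripB_eq_stripA _).1 false]
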